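-- pv_equiv track=rewrite | github.com/Aleksey6578/EnikeevGPT | chunk_texts.py | build_overlap
-- ===== SOURCE A (Python) =====
-- from typing import List
--
-- def build_overlap(buffer: List[str], overlap_chars: int) -> List[str]:
--     overlap = []
--     total = 0
--     for u in reversed(buffer):
--         if total + len(u) > overlap_chars:
--             break
--         overlap.insert(0, u)
--         total += len(u)
--     return overlap
-- ===== SOURCE B (Python) =====
-- from typing import List
--
-- def build_overlap(buffer: List[str], overlap_chars: int) -> List[str]:
--     # cumulative lengths of trailing units: tails[j] = len of last j+1 units combined
--     tails = []
--     s = 0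
--     for u in reversed(buffer):
--         s += len(u)
--         tails.append(s)
--     # binary search (tails is nondecreasing): lo = number of trailing units that fit
--     lo, hi = 0, len(tails)
--     while lo < hi:
--         mid = (lo + hi) // 2
--         if tails[mid] <= overlap_chars:
--             lo = mid + 1
--         else:
--             hi = mid
--     return buffer[len(buffer) - lo:]
-- ===== Notes on version B (the rewrite author's own statement) =====
-- stated objective: alternative
-- what changed: B precomputes the nondecreasing cumulative lengths of trailing units and binary-searches for how many fit, returning a single tail slice, instead of A's backward scan that builds the suffix by repeated insert(0, u).
import Mathlib
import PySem

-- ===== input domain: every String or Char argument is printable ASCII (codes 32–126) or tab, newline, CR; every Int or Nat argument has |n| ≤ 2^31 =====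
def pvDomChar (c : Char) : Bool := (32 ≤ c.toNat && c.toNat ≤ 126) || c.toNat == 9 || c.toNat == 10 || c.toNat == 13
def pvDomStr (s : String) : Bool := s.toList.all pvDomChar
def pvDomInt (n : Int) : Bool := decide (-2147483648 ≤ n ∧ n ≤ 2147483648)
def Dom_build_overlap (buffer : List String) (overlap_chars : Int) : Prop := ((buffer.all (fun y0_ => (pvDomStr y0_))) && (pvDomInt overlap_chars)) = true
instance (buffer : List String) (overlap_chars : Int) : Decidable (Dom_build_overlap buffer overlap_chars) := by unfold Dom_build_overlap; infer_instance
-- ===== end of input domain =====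

-- B precomputes cumulative trailing lengths and binary-searches for the number of fitting
-- trailing units, returning one tail slice, instead of A's backward scan with insert(0, u).


-- ===== PORT A =====
-- the 'for u in reversed(buffer)' loop: state = (overlap, total); 'break' returns overlap
def buildLoopA (oc : Int) : List String → List String → Int → List String
  | [], overlap, _ => overlap
  | u :: rest, overlap, total =>
    if total + PySem.Str.len u > oc then overlap
    else buildLoopA oc rest (u :: overlap) (total + PySem.Str.len u)

def build_overlap (buffer : List String) (overlap_chars : Int) : List String :=
  buildLoopA overlap_chars buffer.reverse [] 0

-- ===== PORT B =====
-- the 'for u in reversed(buffer): s += len(u); tails.append(s)' loop, as the structural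
-- recursion that emits the appended values in the same order
def tailsAux : List String → Int → List Int
  | [], _ => []
  | u :: rest, s => (s + PySem.Str.len u) :: tailsAux rest (s + PySem.Str.len u)

-- the 'while lo < hi' binary-search loop; tails[mid] is always in range (lo ≤ mid < hi ≤ len),
-- so getD with any default is exact for Python's tails[mid]; the fuel argument (= initial
-- hi - lo bound, here tails.length) only makes the loop structurally total: each iteration
-- shrinks hi - lo, so the fuel is never exhausted before the loop exits
def bsearchB (tails : List Int) (oc : Int) : Nat → Nat → Nat → Nat
  | 0, lo, _hi => lo
  | fuel + 1, lo, hi =>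
    if lo < hi then
      let mid := (lo + hi) / 2
      if tails.getD mid 0 ≤ oc then bsearchB tails oc fuel (mid + 1) hi
      else bsearchB tails oc fuel lo mid
    else lo

-- buffer[len(buffer)-lo:] with 0 ≤ len-lo is exactly List.drop
def build_overlap_alt (buffer : List String) (overlap_chars : Int) : List String :=
  let tails := tailsAux buffer.reverse 0
  let lo := bsearchB tails overlap_chars tails.length 0 tails.length
  buffer.drop (buffer.length - lo)

-- ===== PRECONDITION & SPEC =====
def Spec_build_overlap (buffer : List String) (overlap_chars : Int) (out : List String) : Prop := out = build_overlap_alt buffer overlap_chars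
instance (buffer : List String) (overlap_chars : Int) (out : List String) : Decidable (Spec_build_overlap buffer overlap_chars out) := by unfold Spec_build_overlap; infer_instance

-- ===== CLAIM (what is proved, stated in full; the proofs are below) =====
def Claim_equal_build_overlap : Prop := ∀ (buffer : List String) (overlap_chars : Int), Dom_build_overlap buffer overlap_chars → Spec_build_overlap buffer overlap_chars (build_overlap buffer overlap_chars)

-- ===== LEMMAS AND PROOFS =====

-- proof-only characterisation of A's loop: the collected units, read in scan order
def fitA (oc : Int) : List String → Int → List String
  | [], _ => []
  | u :: rest, t =>
    if t + PySem.Str.len u > oc then []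
    else u :: fitA oc rest (t + PySem.Str.len u)

theorem buildLoopA_eq (oc : Int) (r : List String) :
    ∀ (acc : List String) (t : Int), buildLoopA oc r acc t = (fitA oc r t).reverse ++ acc := by
  induction r with
  | nil => intro acc t; simp [buildLoopA, fitA]
  | cons u rest ih =>
    intro acc t
    simp only [buildLoopA, fitA]
    split_ifs with h
    · simp
    · rw [ih]; simp

theorem str_len_nonneg (u : String) : 0 ≤ PySem.Str.len u := by
  simp [PySem.Str.len_eq]

theorem tailsAux_length (l : List String) : ∀ t, (tailsAux l t).length = l.length := by
  induction l with
  | nil => intro t; rfl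
  | cons u rest ih => intro t; simp [tailsAux, ih]

theorem tailsAux_lb (l : List String) : ∀ t, ∀ x ∈ tailsAux l t, t ≤ x := by
  induction l with
  | nil => intro t x hx; simp [tailsAux] at hx
  | cons u rest ih =>
    intro t x hx
    have hu := str_len_nonneg u
    simp only [tailsAux, List.mem_cons] at hx
    rcases hx with h | h
    · omega
    · have := ih (t + PySem.Str.len u) x h; omega

theorem tailsAux_sorted (l : List String) : ∀ t, List.Pairwise (· ≤ ·) (tailsAux l t) := by
  induction l with
  | nil => intro t; simp [tailsAux]
  | cons u rest ih =>
    intro t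
    simp only [tailsAux, List.pairwise_cons]
    exact ⟨fun x hx => tailsAux_lb rest (t + PySem.Str.len u) x hx, ih _⟩

theorem tails_mono (tails : List Int) (hs : List.Pairwise (· ≤ ·) tails) :
    ∀ i j, i ≤ j → j < tails.length → tails.getD i 0 ≤ tails.getD j 0 := by
  intro i j hij hj
  rcases Nat.eq_or_lt_of_le hij with rfl | hlt
  · exact le_refl _
  · rw [List.getD_eq_getElem tails 0 (by omega), List.getD_eq_getElem tails 0 hj]
    exact (List.pairwise_iff_getElem.mp hs) i j (by omega) hj hlt

-- binary-search invariant: result k keeps everything below ≤ oc and everything at/above > oc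
theorem bsearchB_spec (tails : List Int) (oc : Int)
    (hm : ∀ i j, i ≤ j → j < tails.length → tails.getD i 0 ≤ tails.getD j 0) :
    ∀ (fuel lo hi : Nat), hi - lo ≤ fuel → lo ≤ hi → hi ≤ tails.length →
    (∀ i, i < lo → tails.getD i 0 ≤ oc) →
    (∀ i, hi ≤ i → i < tails.length → oc < tails.getD i 0) →
    (∀ i, i < bsearchB tails oc fuel lo hi → tails.getD i 0 ≤ oc) ∧
      bsearchB tails oc fuel lo hi ≤ tails.length ∧
      (∀ i, bsearchB tails oc fuel lo hi ≤ i → i < tails.length → oc < tails.getD i 0) := by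
  intro fuel
  induction fuel with
  | zero =>
    intro lo hi hgap hle hlen hlow hhigh
    simp only [bsearchB]
    exact ⟨hlow, by omega, fun i h1 h2 => hhigh i (by omega) h2⟩
  | succ n ih =>
    intro lo hi hgap hle hlen hlow hhigh
    by_cases hlt : lo < hi
    · by_cases hmid : tails.getD ((lo + hi) / 2) 0 ≤ oc
      · have hmid' : tails[(lo + hi) / 2]?.getD 0 ≤ oc := by
          simpa [List.getD_eq_getElem?_getD] using hmid
        rw [show bsearchB tails oc (n + 1) lo hi
            = bsearchB tails oc n ((lo + hi) / 2 + 1) hi from by simp [bsearchB, hlt, hmid']]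
        exact ih ((lo + hi) / 2 + 1) hi (by omega) (by omega) hlen
          (fun i hilt => le_trans (hm i ((lo + hi) / 2) (by omega) (by omega)) hmid) hhigh
      · have hmid' : ¬ tails[(lo + hi) / 2]?.getD 0 ≤ oc := by
          simpa [List.getD_eq_getElem?_getD] using hmid
        rw [show bsearchB tails oc (n + 1) lo hi
            = bsearchB tails oc n lo ((lo + hi) / 2) from by simp [bsearchB, hlt, hmid']]
        exact ih lo ((lo + hi) / 2) (by omega) (by omega) (by omega) hlow
          (fun i hge hilt => lt_of_lt_of_le (by omega : oc < tails.getD ((lo + hi) / 2) 0)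
            (hm ((lo + hi) / 2) i hge hilt))
    · rw [show bsearchB tails oc (n + 1) lo hi = lo from by simp [bsearchB, hlt]]
      exact ⟨hlow, by omega, fun i h1 h2 => hhigh i (by omega) h2⟩

-- fitA is a prefix: it equals take of its own length
theorem fitA_take (oc : Int) (l : List String) :
    ∀ t, fitA oc l t = l.take (fitA oc l t).length := by
  induction l with
  | nil => intro t; simp [fitA]
  | cons u rest ih =>
    intro t
    simp only [fitA]
    split_ifs with h
    · simp
    · simp only [List.length_cons, List.take_succ_cons]
      rw [← ih]

-- fitA's length satisfies the same boundary characterisation over tailsAux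
theorem fitA_char (oc : Int) (l : List String) :
    ∀ t, (∀ i, i < (fitA oc l t).length → (tailsAux l t).getD i 0 ≤ oc) ∧
      (fitA oc l t).length ≤ l.length ∧
      ((fitA oc l t).length < l.length → oc < (tailsAux l t).getD (fitA oc l t).length 0) := by
  induction l with
  | nil => intro t; simp [fitA, tailsAux]
  | cons u rest ih =>
    intro t
    obtain ⟨h1, h2, h3⟩ := ih (t + PySem.Str.len u)
    simp only [fitA, tailsAux]
    split_ifs with h
    · refine ⟨by intro i hi; simp at hi, by simp, ?_⟩
      intro _
      simpa using h
    · refine ⟨?_, by simpa using h2, ?_⟩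
      · intro i hi
        match i with
        | 0 => simpa using (by omega : t + PySem.Str.len u ≤ oc)
        | Nat.succ j =>
          simp only [List.length_cons] at hi
          simpa using h1 j (by omega)
      · intro hlt
        simp only [List.length_cons] at hlt
        simpa using h3 (by omega)

-- the two characterisations pin the same k (uniqueness via monotone boundary)
theorem k_unique (tails : List Int) (oc : Int) (k1 k2 : Nat)
    (h1a : ∀ i, i < k1 → tails.getD i 0 ≤ oc) (h1b : k1 ≤ tails.length)
    (h1c : k1 < tails.length → oc < tails.getD k1 0)
    (h2a : ∀ i, i < k2 → tails.getD i 0 ≤ oc) (h2b : k2 ≤ tails.length)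
    (h2c : k2 < tails.length → oc < tails.getD k2 0) : k1 = k2 := by
  by_contra hne
  rcases Nat.lt_or_ge k1 k2 with h | h
  · exact absurd (h2a k1 h) (not_le.mpr (h1c (by omega)))
  · exact absurd (h1a k2 (by omega)) (not_le.mpr (h2c (by omega)))

theorem reverse_take_eq_drop (l : List String) (k : Nat) (hk : k ≤ l.length) :
    (l.reverse.take k).reverse = l.drop (l.length - k) := by
  rw [← List.reverse_reverse (l.drop (l.length - k))]
  congr 1
  rw [List.reverse_drop]
  congr 1
  omega

-- ===== VERDICT (by name: the statement is the Claim_ definition above) =====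
theorem build_overlap_spec : Claim_equal_build_overlap := by
  intro buffer oc _
  unfold Spec_build_overlap build_overlap build_overlap_alt
  set r := buffer.reverse with hr
  set tails := tailsAux r 0 with ht
  have hlen : tails.length = r.length := tailsAux_length r 0
  have hmono := tails_mono tails (tailsAux_sorted r 0)
  obtain ⟨hb1, hb2, hb3⟩ := bsearchB_spec tails oc hmono tails.length 0 tails.length
    (by omega) (by omega) (le_refl _) (by omega) (by omega)
  obtain ⟨hf1, hf2, hf3⟩ := fitA_char oc r 0
  have hk : (fitA oc r 0).length = bsearchB tails oc tails.length 0 tails.length := by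
    refine k_unique tails oc _ _ hf1 (by omega) (fun h => hf3 (by omega)) hb1 hb2
      (fun h => hb3 _ (le_refl _) h)
  rw [buildLoopA_eq, List.append_nil, fitA_take oc r 0, hk]
  have hbuf : r.length = buffer.length := by simp [hr]
  exact reverse_take_eq_drop buffer _ (by omega)
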